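-- pv_equiv track=rewrite | github.com/catowabisabi/meow-code | api_server/services/extract_memories.py | count_model_visible_messages_since
-- ===== SOURCE A (Python) =====
-- from typing import Optional, List, Dict, Any, Callable
--
-- def is_model_visible_message(message: Dict[str, Any]) -> bool:
--     """
--     Check if a message is visible to the model.
--
--     Args:
--         message: Message dictionary
--
--     Returns:
--         True if the message type is 'user' or 'assistant'
--     """
--     return message.get("type") in ("user", "assistant")
--
-- def count_model_visible_messages_since(
--     messages: List[Dict[str, Any]],
--     since_uuid: Optional[str],
-- ) -> int:
--     """
--     Count model-visible messages since a given UUID.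
--
--     Args:
--         messages: List of message dictionaries
--         since_uuid: Optional UUID to count from
--
--     Returns:
--         Number of visible messages
--     """
--     if since_uuid is None:
--         return sum(1 for m in messages if is_model_visible_message(m))
--
--     found_start = False
--     count = 0
--     for message in messages:
--         if not found_start:
--             if message.get("uuid") == since_uuid:
--                 found_start = True
--             continue
--         if is_model_visible_message(message):
--             count += 1
--
--     if not found_start:
--         return sum(1 for m in messages if is_model_visible_message(m))
--
--     return count
-- ===== SOURCE B (Python) =====
-- def is_model_visible_message(message):
--     return message.get("type") in ("user", "assistant")
--
-- def count_model_visible_messages_since(messages, since_uuid):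
--     # Complement counting: total visible minus visible up to and including the
--     # first message whose uuid matches; total if no marker applies.
--     total = sum(1 for m in messages if is_model_visible_message(m))
--     if since_uuid is None:
--         return total
--     seen = 0
--     for m in messages:
--         if is_model_visible_message(m):
--             seen += 1
--         if m.get("uuid") == since_uuid:
--             return total - seen
--     return total
-- ===== Notes on version B (the rewrite author's own statement) =====
-- stated objective: alternative
-- what changed: Replaces A's count-after-a-found_start-flag loop (with a duplicated fallback sum) by complement counting: compute the total number of visible messages, then walk once tracking the visible count up to and including the first uuid match and return total minus that running count (total when since_uuid is None or never matches).
import Mathlib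
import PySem

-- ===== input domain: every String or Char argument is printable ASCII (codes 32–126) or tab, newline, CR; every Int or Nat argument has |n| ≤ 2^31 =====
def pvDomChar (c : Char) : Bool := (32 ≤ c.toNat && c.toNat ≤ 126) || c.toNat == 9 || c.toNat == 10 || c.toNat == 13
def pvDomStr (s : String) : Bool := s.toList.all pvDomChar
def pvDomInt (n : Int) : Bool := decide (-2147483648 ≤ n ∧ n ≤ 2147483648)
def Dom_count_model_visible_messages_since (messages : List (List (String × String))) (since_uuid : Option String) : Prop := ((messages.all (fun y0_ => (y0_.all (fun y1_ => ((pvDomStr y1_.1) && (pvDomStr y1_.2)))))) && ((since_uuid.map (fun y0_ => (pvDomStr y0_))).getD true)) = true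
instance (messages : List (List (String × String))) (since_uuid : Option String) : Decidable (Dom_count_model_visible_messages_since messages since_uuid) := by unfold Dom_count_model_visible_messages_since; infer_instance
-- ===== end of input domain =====

-- B replaces A's found_start-flag loop by complement counting (total visible minus visible up to and including the first uuid match); return values proved equal.

-- ===== PORT A =====
-- message.get("type") in ("user", "assistant")
def is_model_visible_message (message : List (String × String)) : Bool :=
  match (PySem.Dict.mk message).get? "type" with
  | some s => s == "user" || s == "assistant"
  | none => false

def count_model_visible_messages_since (messages : List (List (String × String))) (since_uuid : Option String) : Int :=
  match since_uuid with
  | none => messages.foldl (fun c m => if is_model_visible_message m then c + 1 else c) 0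
  | some u =>
    -- found_start / count loop
    let r := messages.foldl (fun (st : Bool × Int) m =>
      if !st.1 then
        (if (PySem.Dict.mk m).get? "uuid" == some u then (true, st.2) else (false, st.2))
      else
        (true, if is_model_visible_message m then st.2 + 1 else st.2)) (false, 0)
    if !r.1 then messages.foldl (fun c m => if is_model_visible_message m then c + 1 else c) 0
    else r.2

-- ===== PORT B =====
-- total = sum(1 for m in messages if is_model_visible_message(m))
def pvTotalVisible (xs : List (List (String × String))) : Int :=
  (xs.countP is_model_visible_message : Int)

-- the `for m in messages:` loop of Source B with its early `return total - seen`
def pvSubtractLoop (u : String) (total : Int) : List (List (String × String)) → Int → Int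
  | [], _ => total
  | m :: rest, seen =>
    let seen' := if is_model_visible_message m then seen + 1 else seen
    if (PySem.Dict.mk m).get? "uuid" == some u then total - seen'
    else pvSubtractLoop u total rest seen'

def count_model_visible_messages_since_alt (messages : List (List (String × String))) (since_uuid : Option String) : Int :=
  let total := pvTotalVisible messages
  match since_uuid with
  | none => total
  | some u => pvSubtractLoop u total messages 0

-- ===== PRECONDITION & SPEC =====
def Spec_count_model_visible_messages_since (messages : List (List (String × String))) (since_uuid : Option String) (out : Int) : Prop := out = count_model_visible_messages_since_alt messages since_uuid
instance (messages : List (List (String × String))) (since_uuid : Option String) (out : Int) : Decidable (Spec_count_model_visible_messages_since messages since_uuid out) := by unfold Spec_count_model_visible_messages_since; infer_instance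

-- ===== CLAIM (what is proved, stated in full; the proofs are below) =====
def Claim_equal_count_model_visible_messages_since : Prop := ∀ (messages : List (List (String × String))) (since_uuid : Option String), Dom_count_model_visible_messages_since messages since_uuid → Spec_count_model_visible_messages_since messages since_uuid (count_model_visible_messages_since messages since_uuid)

-- ===== LEMMAS AND PROOFS =====

lemma foldl_count_vis (xs : List (List (String × String))) (c : Int) :
    xs.foldl (fun c m => if is_model_visible_message m then c + 1 else c) c
      = c + (xs.countP is_model_visible_message : Int) := by
  induction xs generalizing c with
  | nil => simp
  | cons x xs ih =>
    simp only [List.foldl_cons, List.countP_cons, ih]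
    by_cases h : is_model_visible_message x <;> simp [h] <;> try omega

lemma foldl_true_count (u : String) (xs : List (List (String × String))) (c : Int) :
    xs.foldl (fun (st : Bool × Int) m =>
      if !st.1 then
        (if (PySem.Dict.mk m).get? "uuid" == some u then (true, st.2) else (false, st.2))
      else (true, if is_model_visible_message m then st.2 + 1 else st.2)) (true, c)
      = (true, c + (xs.countP is_model_visible_message : Int)) := by
  induction xs generalizing c with
  | nil => simp
  | cons x xs ih =>
    rw [List.foldl_cons]
    show List.foldl _ (true, if is_model_visible_message x then c + 1 else c) xs = _
    by_cases h : is_model_visible_message x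
    · rw [if_pos h, ih, List.countP_cons, if_pos h]; simp only [Prod.mk.injEq, true_and]; push_cast; ring
    · rw [if_neg h, ih, List.countP_cons, if_neg h]; simp

-- A's flag loop characterised by the first index matching the uuid
lemma foldl_flag_eq_findIdx (u : String) (xs : List (List (String × String))) (c : Int) :
    xs.foldl (fun (st : Bool × Int) m =>
      if !st.1 then
        (if (PySem.Dict.mk m).get? "uuid" == some u then (true, st.2) else (false, st.2))
      else (true, if is_model_visible_message m then st.2 + 1 else st.2)) (false, c)
      = match xs.findIdx? (fun m => (PySem.Dict.mk m).get? "uuid" == some u) with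
        | none => (false, c)
        | some i => (true, c + ((xs.drop (i + 1)).countP is_model_visible_message : Int)) := by
  induction xs generalizing c with
  | nil => simp
  | cons x xs ih =>
    rw [List.foldl_cons]
    show List.foldl _
        (if (PySem.Dict.mk x).get? "uuid" == some u then (true, c) else (false, c)) xs = _
    by_cases h : ((PySem.Dict.mk x).get? "uuid" == some u) = true
    · rw [if_pos h, foldl_true_count u xs c, List.findIdx?_cons]
      simp [h]
    · rw [if_neg h, ih, List.findIdx?_cons]
      cases hf : xs.findIdx? (fun m => (PySem.Dict.mk m).get? "uuid" == some u) <;>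
        simp [h]

-- B's subtract loop characterised by the first index matching the uuid
lemma pvSubtractLoop_eq_findIdx (u : String) (total : Int) (xs : List (List (String × String))) (seen : Int) :
    pvSubtractLoop u total xs seen
      = match xs.findIdx? (fun m => (PySem.Dict.mk m).get? "uuid" == some u) with
        | none => total
        | some i => total - (seen + ((xs.take (i + 1)).countP is_model_visible_message : Int)) := by
  induction xs generalizing seen with
  | nil => simp [pvSubtractLoop]
  | cons x xs ih =>
    rw [pvSubtractLoop, List.findIdx?_cons]
    by_cases h : ((PySem.Dict.mk x).get? "uuid" == some u) = true
    · simp only [h, if_pos]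
      by_cases hv : is_model_visible_message x <;>
        simp [hv, List.countP_cons]
    · simp only [h, if_neg, Bool.false_eq_true, not_false_iff, if_false]
      rw [ih]
      cases hf : xs.findIdx? (fun m => (PySem.Dict.mk m).get? "uuid" == some u) with
      | none => simp [h, hf]
      | some i =>
        simp only [h, hf, Bool.false_eq_true, if_false, Option.map_some]
        have : (x :: xs).take (i + 1 + 1) = x :: xs.take (i + 1) := rfl
        rw [this, List.countP_cons]
        by_cases hv : is_model_visible_message x <;> simp [hv] <;> push_cast <;> ring

lemma countP_drop_eq (p : List (String × String) → Bool) (xs : List (List (String × String))) (i : ℕ) :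
    ((xs.drop (i + 1)).countP p : Int) = (xs.countP p : Int) - ((xs.take (i + 1)).countP p : Int) := by
  have h := List.countP_append (p := p) (l₁ := xs.take (i + 1)) (l₂ := xs.drop (i + 1))
  rw [List.take_append_drop] at h
  omega

-- ===== VERDICT (by name: the statement is the Claim_ definition above) =====
theorem count_model_visible_messages_since_spec : Claim_equal_count_model_visible_messages_since := by
  intro messages since_uuid _
  unfold Spec_count_model_visible_messages_since count_model_visible_messages_since count_model_visible_messages_since_alt
  cases since_uuid with
  | none => simp [foldl_count_vis, pvTotalVisible]
  | some u =>
    dsimp only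
    rw [foldl_flag_eq_findIdx u messages 0, pvSubtractLoop_eq_findIdx]
    cases hf : messages.findIdx? (fun m => (PySem.Dict.mk m).get? "uuid" == some u) with
    | none => simp [foldl_count_vis, pvTotalVisible]
    | some i =>
      simp only [pvTotalVisible]
      rw [countP_drop_eq]
      simp
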